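-- pv_equiv track=rewrite | github.com/cmdewey04/Swish | swish_app/src/Backend/predictions/generate.py | _dedupe_player_name
-- ===== SOURCE A (Python) =====
-- def _dedupe_player_name(raw):
--     """Fix doubled names from CBS scraper."""
--     if not raw:
--         return "Unknown"
--     splits = []
--     for j in range(1, len(raw)):
--         if raw[j].isupper() and raw[j - 1].islower():
--             splits.append(j)
--     if splits:
--         for split_pos in splits:
--             candidate = raw[split_pos:]
--             if ' ' in candidate and len(candidate) > 4:
--                 return candidate
--     return raw
-- ===== SOURCE B (Python) =====
-- def _dedupe_player_name(raw):
--     """Fix doubled names from CBS scraper.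
--
--     Different algorithm: instead of testing each candidate suffix with a
--     substring scan (' ' in candidate) and a length check, precompute the
--     rightmost space position once and turn both suffix tests into a single
--     arithmetic bound on the split index: raw[j:] contains a space iff
--     j <= last_space, and len(raw[j:]) > 4 iff j <= len(raw) - 5.  The search
--     then runs only over indices up to that bound, with no per-candidate
--     rescans."""
--     if not raw:
--         return "Unknown"
--     last_space = -1
--     for i, ch in enumerate(raw):
--         if ch == ' ':
--             last_space = i
--     limit = min(last_space, len(raw) - 5)
--     for j in range(1, limit + 1):
--         if raw[j].isupper() and raw[j - 1].islower():
--             return raw[j:]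
--     return raw
-- ===== Notes on version B (the rewrite author's own statement) =====
-- stated objective: alternative
-- what changed: Replaces the per-candidate suffix tests (' ' in candidate substring scan plus length check, repeated for every split position) by one precomputed rightmost-space index and an arithmetic bound limit = min(last_space, len-5), so the search is a single boundary scan over range(1, limit+1) with no rescans and no splits list.
import Mathlib
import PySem

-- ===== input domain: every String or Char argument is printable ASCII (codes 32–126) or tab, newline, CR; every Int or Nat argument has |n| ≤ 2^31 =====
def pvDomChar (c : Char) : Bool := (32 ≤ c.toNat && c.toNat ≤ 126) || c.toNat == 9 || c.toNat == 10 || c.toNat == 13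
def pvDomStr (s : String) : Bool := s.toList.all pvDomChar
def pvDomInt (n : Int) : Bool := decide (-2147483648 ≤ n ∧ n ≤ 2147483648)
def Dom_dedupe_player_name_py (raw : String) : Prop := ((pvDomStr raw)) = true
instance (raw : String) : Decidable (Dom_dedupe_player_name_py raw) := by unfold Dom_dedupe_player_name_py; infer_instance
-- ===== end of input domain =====

-- B replaces A's per-candidate suffix tests (substring scan for ' ' plus a length
-- check at each split position) by one precomputed rightmost-space index and the
-- arithmetic bound limit = min(last_space, len-5); return values are proved equal.

-- ===== PORT A =====
def dedupe_player_name_py (raw : String) : String :=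
  let cs := raw.toList
  if cs.isEmpty then "Unknown" else
  let splits := (List.range' 1 (cs.length - 1)).foldl
      (fun acc j =>
        if PySem.Chars.isupper (cs.getD j ' ') && PySem.Chars.islower (cs.getD (j - 1) ' ')
        then acc ++ [j] else acc) []
  if !splits.isEmpty then
    match splits.foldl
        (fun res split_pos =>
          match res with
          | some c => some c
          | none =>
            let cand := cs.drop split_pos
            if PySem.Chars.isIn [' '] cand && decide (4 < cand.length)
            then some cand else none) none with
    | some cand => String.ofList cand
    | none => raw
  else raw

-- ===== PORT B =====
def dedupe_player_name_py_alt (raw : String) : String :=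
  let cs := raw.toList
  if cs.isEmpty then "Unknown" else
  let lastSpace : Int := (PySem.List.enumerate cs 0).foldl
      (fun acc p => if p.2 == ' ' then p.1 else acc) (-1)
  let limit : Int := min lastSpace ((cs.length : Int) - 5)
  match (PySem.List.pyRange 1 (limit + 1) 1).findSome? (fun j =>
      if PySem.Chars.isupper (cs.getD j.toNat ' ') && PySem.Chars.islower (cs.getD (j.toNat - 1) ' ')
      then some (cs.drop j.toNat) else none) with
  | some cand => String.ofList cand
  | none => raw

-- ===== PRECONDITION & SPEC =====
def Spec_dedupe_player_name_py (raw : String) (out : String) : Prop := out = dedupe_player_name_py_alt raw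
instance (raw : String) (out : String) : Decidable (Spec_dedupe_player_name_py raw out) := by unfold Spec_dedupe_player_name_py; infer_instance

-- ===== CLAIM (what is proved, stated in full; the proofs are below) =====
def Claim_equal_dedupe_player_name_py : Prop := ∀ (raw : String), Dom_dedupe_player_name_py raw → Spec_dedupe_player_name_py raw (dedupe_player_name_py raw)

-- ===== LEMMAS AND PROOFS =====

/-- the split condition of both programs, at index `j` of `cs` -/
def dpnP (cs : List Char) (j : Nat) : Bool :=
  PySem.Chars.isupper (cs.getD j ' ') && PySem.Chars.islower (cs.getD (j - 1) ' ')

/-- the candidate test of program A, at index `j` of `cs` -/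
def dpnG (cs : List Char) (j : Nat) : Option (List Char) :=
  if PySem.Chars.isIn [' '] (cs.drop j) && decide (4 < (cs.drop j).length)
  then some (cs.drop j) else none

/-- position of the last space of `cs` (0 when there is none) -/
def dpnLastPos : List Char → Nat
  | [] => 0
  | _ :: cs => if ' ' ∈ cs then 1 + dpnLastPos cs else 0

theorem dpn_foldl_filter (cs : List Char) (l : List Nat) (acc : List Nat) :
    l.foldl (fun acc j =>
        if PySem.Chars.isupper (cs.getD j ' ') && PySem.Chars.islower (cs.getD (j - 1) ' ')
        then acc ++ [j] else acc) acc = acc ++ l.filter (dpnP cs) := by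
  induction l generalizing acc with
  | nil => simp
  | cons a l ih =>
    simp only [List.foldl_cons, List.filter_cons, dpnP]
    by_cases h : (PySem.Chars.isupper (cs.getD a ' ') && PySem.Chars.islower (cs.getD (a - 1) ' ')) = true
    · rw [if_pos h, if_pos h, ih]
      simp
    · rw [if_neg h, if_neg h]
      exact ih acc

theorem dpn_foldl_first_some (cs : List Char) (l : List Nat) (c : List Char) :
    l.foldl (fun res split_pos =>
        match res with
        | some c => some c
        | none =>
          if PySem.Chars.isIn [' '] (cs.drop split_pos) && decide (4 < (cs.drop split_pos).length)
          then some (cs.drop split_pos) else none) (some c) = some c := by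
  induction l with
  | nil => rfl
  | cons a l ih =>
    rw [List.foldl_cons]
    simpa using ih

theorem dpn_foldl_first_none (cs : List Char) (l : List Nat) :
    l.foldl (fun res split_pos =>
        match res with
        | some c => some c
        | none =>
          if PySem.Chars.isIn [' '] (cs.drop split_pos) && decide (4 < (cs.drop split_pos).length)
          then some (cs.drop split_pos) else none) none
      = l.findSome? (dpnG cs) := by
  induction l with
  | nil => rfl
  | cons a l ih =>
    rw [List.foldl_cons, List.findSome?_cons]
    dsimp only
    rw [show (if PySem.Chars.isIn [' '] (cs.drop a) && decide (4 < (cs.drop a).length)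
              then some (cs.drop a) else none) = dpnG cs a from rfl]
    cases hg : dpnG cs a with
    | some c => simpa using dpn_foldl_first_some cs l c
    | none => simpa using ih

theorem dpn_findSome?_filter (cs : List Char) (l : List Nat) :
    (l.filter (dpnP cs)).findSome? (dpnG cs)
      = l.findSome? (fun j => if dpnP cs j then dpnG cs j else none) := by
  induction l with
  | nil => simp
  | cons a l ih =>
    rw [List.filter_cons, List.findSome?_cons]
    by_cases h : dpnP cs a = true
    · simp only [if_pos h, List.findSome?_cons]
      cases hg : dpnG cs a <;> simp [ih]
    · simp only [if_neg h]
      simpa using ih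

/-- the last-space fold computes `dpnLastPos` (shifted by the start index) -/
theorem dpn_fold_lastSpace (cs : List Char) : ∀ (s a : Int),
    (PySem.List.enumerate cs s).foldl (fun acc p => if p.2 == ' ' then p.1 else acc) a
      = if ' ' ∈ cs then s + (dpnLastPos cs : Int) else a := by
  induction cs with
  | nil => intro s a; simp [PySem.List.enumerate_nil]
  | cons c cs ih =>
    intro s a
    rw [PySem.List.enumerate_cons, List.foldl_cons]
    dsimp only
    rw [ih (s + 1) (if c == ' ' then s else a)]
    by_cases hcs : ' ' ∈ cs
    · have hm : ' ' ∈ c :: cs := List.mem_cons_of_mem c hcs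
      simp only [hcs, if_pos, hm, dpnLastPos]
      push_cast
      ring
    · by_cases hc : c = ' '
      · have hm : ' ' ∈ c :: cs := by simp [hc]
        simp [hcs, dpnLastPos, hc]
      · have hm : ' ' ∉ c :: cs := by
          simp [List.mem_cons, hcs]
          intro h; exact hc h.symm
        simp [hcs, hm, hc]

/-- membership of a space in a suffix, via `dpnLastPos` -/
theorem dpn_mem_drop_iff (cs : List Char) : ∀ (j : Nat),
    (' ' ∈ cs.drop j) ↔ (' ' ∈ cs ∧ j ≤ dpnLastPos cs) := by
  induction cs with
  | nil => intro j; simp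
  | cons c cs ih =>
    intro j
    cases j with
    | zero => simp
    | succ j =>
      rw [List.drop_succ_cons, ih j]
      by_cases hcs : ' ' ∈ cs
      · have h1 : dpnLastPos (c :: cs) = 1 + dpnLastPos cs := by simp [dpnLastPos, hcs]
        rw [h1]
        constructor
        · rintro ⟨h2, h3⟩
          exact ⟨List.mem_cons_of_mem c hcs, by omega⟩
        · rintro ⟨h2, h3⟩
          exact ⟨hcs, by omega⟩
      · simp [dpnLastPos, hcs]

/-- A's candidate test is an arithmetic bound on the index -/
theorem dpn_dpnG (cs : List Char) (j : Nat) :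
    dpnG cs j = if (j : Int) ≤ min (if ' ' ∈ cs then (dpnLastPos cs : Int) else -1)
        ((cs.length : Int) - 5) then some (cs.drop j) else none := by
  unfold dpnG
  have hmem : PySem.Chars.isIn [' '] (cs.drop j) = true ↔ (' ' ∈ cs ∧ j ≤ dpnLastPos cs) := by
    rw [PySem.Chars.isIn_iff_infix, List.singleton_infix_iff, dpn_mem_drop_iff]
  have hlen : (cs.drop j).length = cs.length - j := List.length_drop
  by_cases h : (j : Int) ≤ min (if ' ' ∈ cs then (dpnLastPos cs : Int) else -1) ((cs.length : Int) - 5)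
  · rw [if_pos h]
    rw [le_min_iff] at h
    obtain ⟨hL, hn⟩ := h
    have hc : ' ' ∈ cs := by
      by_contra hc
      rw [if_neg hc] at hL
      omega
    rw [if_pos hc] at hL
    have h1 : PySem.Chars.isIn [' '] (cs.drop j) = true := hmem.mpr ⟨hc, by omega⟩
    have h2 : 4 < (cs.drop j).length := by rw [hlen]; omega
    simp only [h1, Bool.true_and]
    rw [if_pos (by exact decide_eq_true h2)]
  · rw [if_neg h]
    by_cases hin : PySem.Chars.isIn [' '] (cs.drop j) = true
    · obtain ⟨hc, hj⟩ := hmem.mp hin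
      have hL : (j : Int) ≤ (if ' ' ∈ cs then (dpnLastPos cs : Int) else -1) := by
        rw [if_pos hc]; omega
      have hn : ¬ ((j : Int) ≤ (cs.length : Int) - 5) := fun hh => h (le_min hL hh)
      have h2 : ¬ (4 < (cs.drop j).length) := by rw [hlen]; omega
      simp only [hin, Bool.true_and]
      rw [if_neg (by simpa using h2)]
    · simp [Bool.eq_false_iff.mpr hin]

theorem dpn_findSome?_congr {α β : Type} (l : List α) (f g : α → Option β)
    (h : ∀ x ∈ l, f x = g x) : l.findSome? f = l.findSome? g := by
  induction l with
  | nil => rfl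
  | cons a l ih =>
    rw [List.findSome?_cons, List.findSome?_cons, h a (by simp)]
    cases g a with
    | some b => rfl
    | none => exact ih (fun x hx => h x (by simp [hx]))

theorem dpn_findSome?_none {α β : Type} (l : List α) (f : α → Option β)
    (h : ∀ x ∈ l, f x = none) : l.findSome? f = none := by
  induction l with
  | nil => rfl
  | cons a l ih =>
    rw [List.findSome?_cons, h a (by simp)]
    exact ih (fun x hx => h x (by simp [hx]))

/-- main bridge: A's search over all indices equals B's bounded search -/
theorem dpn_main (cs : List Char) :
    (List.range' 1 (cs.length - 1)).findSome? (fun j => if dpnP cs j then dpnG cs j else none)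
      = (PySem.List.pyRange 1 ((min (if ' ' ∈ cs then (dpnLastPos cs : Int) else -1)
            ((cs.length : Int) - 5)) + 1) 1).findSome? (fun j =>
          if PySem.Chars.isupper (cs.getD j.toNat ' ') && PySem.Chars.islower (cs.getD (j.toNat - 1) ' ')
          then some (cs.drop j.toNat) else none) := by
  set L : Int := min (if ' ' ∈ cs then (dpnLastPos cs : Int) else -1) ((cs.length : Int) - 5) with hLdef
  by_cases hpos : 1 ≤ L
  · -- split the full range at m = L.toNat
    have hLn : ' ' ∈ cs := by
      by_contra hc
      rw [hLdef] at hpos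
      rw [if_neg hc] at hpos
      have := le_min_iff.mp hpos
      omega
    have hlenL : L ≤ (cs.length : Int) - 5 := min_le_right _ _
    set m : Nat := L.toNat with hmdef
    have hmL : (m : Int) = L := Int.toNat_of_nonneg (by omega)
    have hm1 : 1 ≤ m := by omega
    have hmn : m ≤ cs.length - 1 := by omega
    have hsplit : List.range' 1 (cs.length - 1) = List.range' 1 m ++ List.range' (1 + m) (cs.length - 1 - m) := by
      have hn' : cs.length - 1 = m + (cs.length - 1 - m) := by omega
      conv_lhs => rw [hn']
      rw [← List.range'_append, Nat.one_mul]
    rw [hsplit, List.findSome?_append]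
    have hsecond : (List.range' (1 + m) (cs.length - 1 - m)).findSome?
        (fun j => if dpnP cs j then dpnG cs j else none) = none := by
      apply dpn_findSome?_none
      intro j hj
      have hjm := List.mem_range'_1.mp hj
      have hG : dpnG cs j = none := by
        rw [dpn_dpnG, ← hLdef, if_neg (by omega)]
      rw [hG]
      split <;> rfl
    rw [hsecond]
    have hrangeB : PySem.List.pyRange 1 (L + 1) 1 = (List.range m).map (fun (k : Nat) => 1 + (k : Int)) := by
      rw [PySem.List.pyRange_one]
      have h1 : (L + 1 - 1).toNat = m := by omega
      rw [h1]
    have hrangeA : List.range' 1 m = (List.range m).map (fun k => 1 + k) := by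
      rw [List.range'_eq_map_range]
    rw [hrangeB, hrangeA, List.findSome?_map, List.findSome?_map, Option.or_none]
    apply dpn_findSome?_congr
    intro k hk
    have hkm : k < m := List.mem_range.mp hk
    simp only [Function.comp]
    have ht : (1 + (k : Int)).toNat = 1 + k := by omega
    rw [ht]
    have hLdef' : L = min ((dpnLastPos cs : Int)) ((cs.length : Int) - 5) := by
      rw [hLdef, if_pos hLn]
    have hcond : ((1 + k : Nat) : Int) ≤ min (if ' ' ∈ cs then (dpnLastPos cs : Int) else -1)
        ((cs.length : Int) - 5) := by
      rw [if_pos hLn]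
      have h2 : ((1 + k : Nat) : Int) ≤ L := by omega
      rw [hLdef'] at h2
      exact h2
    rw [dpn_dpnG, if_pos hcond]
    rfl
  · -- limit < 1 : both searches are empty / all-none
    have hB : PySem.List.pyRange 1 (L + 1) 1 = [] := PySem.List.pyRange_one_eq_nil (by omega)
    rw [hB, List.findSome?_nil]
    apply dpn_findSome?_none
    intro j hj
    have hjm := List.mem_range'_1.mp hj
    have hG : dpnG cs j = none := by
      rw [dpn_dpnG, ← hLdef, if_neg (by omega)]
    rw [hG]
    split <;> rfl

-- ===== VERDICT (by name: the statement is the Claim_ definition above) =====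
theorem dedupe_player_name_py_spec : Claim_equal_dedupe_player_name_py := by
  intro raw _
  unfold Spec_dedupe_player_name_py dedupe_player_name_py dedupe_player_name_py_alt
  cases hn : raw.toList with
  | nil => simp
  | cons c cs =>
    have hraw : String.ofList (c :: cs) = raw := by rw [← hn, String.ofList_toList]
    simp only [List.isEmpty_cons, Bool.false_eq_true, if_false, List.length_cons,
      Nat.add_sub_cancel, Nat.cast_add, Nat.cast_one]
    rw [dpn_foldl_filter, List.nil_append, dpn_foldl_first_none, dpn_findSome?_filter,
      dpn_fold_lastSpace (c :: cs) 0 (-1)]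
    simp only [zero_add]
    have hmain := dpn_main (c :: cs)
    simp only [List.length_cons, Nat.cast_add, Nat.cast_one, Nat.add_sub_cancel] at hmain
    rw [hmain]
    by_cases he : List.filter (dpnP (c :: cs)) (List.range' 1 cs.length) = []
    · have hnone := hmain
      rw [← dpn_findSome?_filter, he, List.findSome?_nil] at hnone
      rw [he, ← hnone]
      rfl
    · have hne : (List.filter (dpnP (c :: cs)) (List.range' 1 cs.length)).isEmpty = false := by
        simpa [List.isEmpty_iff] using he
      simp only [hne, Bool.not_false, if_true]
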